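-- pv_equiv track=rewrite | github.com/spraldev/comp-prog | usaco/silver/bakery/main.py | check
-- ===== SOURCE A (Python) =====
-- def check(cookie_time, muffin_time, friends, mooney):
--     p = False
--     c, m = cookie_time, muffin_time
--
--     c -= mooney//2
--     m -= mooney//2
--
--     a = []
--
--     for f in friends:
--         a.append(f[0]*c + f[1]*m <= f[2])
--
--     p = all(a)
--
--     if p:
--         return True
--
--     if mooney %2 == 1:
--         c, m = cookie_time, muffin_time
--         c -= mooney//2+1
--         m -= mooney//2
--
--         a = []
--
--         for f in friends:
--             a.append(f[0]*c + f[1]*m <= f[2])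
--
--         p = all(a)
--
--         if p:
--             return True
--
--         c, m = cookie_time, muffin_time
--         c -= mooney//2
--         m -= mooney//2+1
--
--         a = []
--
--         for f in friends:
--             a.append(f[0]*c + f[1]*m <= f[2])
--
--         p = all(a)
--
--         if p:
--             return True
--
--     c, m = cookie_time, muffin_time
--     c -= mooney
--
--     a = []
--
--     for f in friends:
--         a.append(f[0]*c + f[1]*m <= f[2])
--
--     p = all(a)
--
--     if p:
--         return True
--
--     c, m = cookie_time, muffin_time
--     m -= mooney
--
--     a = []
--
--     for f in friends:
--         a.append(f[0]*c + f[1]*m <= f[2])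
--
--     p = all(a)
--
--     if p:
--         return True
--
--     return False
-- ===== SOURCE B (Python) =====
-- def check(cookie_time, muffin_time, friends, mooney):
--     # Transposed traversal: one pass over friends, pruning the surviving
--     # candidate (cookie, muffin) splits; a candidate-free state is infeasible.
--     h = mooney // 2
--     cands = [(cookie_time - h, muffin_time - h)]
--     if mooney % 2 == 1:
--         cands.append((cookie_time - h - 1, muffin_time - h))
--         cands.append((cookie_time - h, muffin_time - h - 1))
--     cands.append((cookie_time - mooney, muffin_time))
--     cands.append((cookie_time, muffin_time - mooney))
--     for x, y, t in friends:
--         cands = [(c, m) for (c, m) in cands if x * c + y * m <= t]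
--         if not cands:
--             return False
--     return True
-- ===== Notes on version B (the rewrite author's own statement) =====
-- stated objective: alternative
-- what changed: Transposed the loops: instead of five unrolled per-candidate scans over friends with early success, B makes a single pass over friends maintaining the set of candidate splits still feasible, pruning it per friend and exiting early when it empties.
import Mathlib
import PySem

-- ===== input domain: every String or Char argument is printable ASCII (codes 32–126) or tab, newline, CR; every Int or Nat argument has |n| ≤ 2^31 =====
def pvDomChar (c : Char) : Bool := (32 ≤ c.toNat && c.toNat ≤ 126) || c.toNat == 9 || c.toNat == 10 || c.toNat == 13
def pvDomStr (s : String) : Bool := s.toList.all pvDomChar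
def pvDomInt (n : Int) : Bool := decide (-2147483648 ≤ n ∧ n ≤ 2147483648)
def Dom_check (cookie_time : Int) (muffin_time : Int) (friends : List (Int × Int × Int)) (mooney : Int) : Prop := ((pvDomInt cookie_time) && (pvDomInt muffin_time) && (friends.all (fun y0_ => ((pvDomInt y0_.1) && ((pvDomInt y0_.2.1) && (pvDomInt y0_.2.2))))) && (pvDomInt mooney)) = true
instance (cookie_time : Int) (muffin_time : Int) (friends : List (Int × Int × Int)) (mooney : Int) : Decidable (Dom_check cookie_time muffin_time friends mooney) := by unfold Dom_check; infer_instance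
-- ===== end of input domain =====

-- ===== PORT A =====
-- B transposes the loops: one pass over friends pruning surviving candidate splits, instead of A's five unrolled per-candidate scans (alternative decomposition; same cost).
-- literal port of one unrolled block of A: a = []; for f in friends: a.append(...); all(a)
def checkBlock (c : Int) (m : Int) (friends : List (Int × Int × Int)) : Bool :=
  (friends.foldl (fun acc f => acc ++ [decide (f.1 * c + f.2.1 * m ≤ f.2.2)]) []).all id

def check (cookie_time : Int) (muffin_time : Int) (friends : List (Int × Int × Int)) (mooney : Int) : Bool :=
  let h := PySem.Int.floordiv mooney 2
  if checkBlock (cookie_time - h) (muffin_time - h) friends then true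
  else if PySem.Int.mod mooney 2 == 1 then
    if checkBlock (cookie_time - (h + 1)) (muffin_time - h) friends then true
    else if checkBlock (cookie_time - h) (muffin_time - (h + 1)) friends then true
    else if checkBlock (cookie_time - mooney) muffin_time friends then true
    else if checkBlock cookie_time (muffin_time - mooney) friends then true
    else false
  else if checkBlock (cookie_time - mooney) muffin_time friends then true
  else if checkBlock cookie_time (muffin_time - mooney) friends then true
  else false

-- ===== PORT B =====
-- the 'for x, y, t in friends' pruning loop of Source B, with its early 'return False'
def pruneLoop (friends : List (Int × Int × Int)) (cands : List (Int × Int)) : Bool :=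
  match friends with
  | [] => true
  | f :: rest =>
    let cands' := cands.filter (fun p => decide (f.1 * p.1 + f.2.1 * p.2 ≤ f.2.2))
    if cands'.isEmpty then false else pruneLoop rest cands'

def check_alt (cookie_time : Int) (muffin_time : Int) (friends : List (Int × Int × Int)) (mooney : Int) : Bool :=
  let h := PySem.Int.floordiv mooney 2
  let cands :=
    [(cookie_time - h, muffin_time - h)] ++
    (if PySem.Int.mod mooney 2 == 1 then
       [(cookie_time - h - 1, muffin_time - h), (cookie_time - h, muffin_time - h - 1)]
     else []) ++
    [(cookie_time - mooney, muffin_time), (cookie_time, muffin_time - mooney)]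
  pruneLoop friends cands

-- ===== PRECONDITION & SPEC =====
def Spec_check (cookie_time : Int) (muffin_time : Int) (friends : List (Int × Int × Int)) (mooney : Int) (out : Bool) : Prop := out = check_alt cookie_time muffin_time friends mooney
instance (cookie_time : Int) (muffin_time : Int) (friends : List (Int × Int × Int)) (mooney : Int) (out : Bool) : Decidable (Spec_check cookie_time muffin_time friends mooney out) := by unfold Spec_check; infer_instance

-- ===== CLAIM (what is proved, stated in full; the proofs are below) =====
def Claim_equal_check : Prop := ∀ (cookie_time : Int) (muffin_time : Int) (friends : List (Int × Int × Int)) (mooney : Int), Dom_check cookie_time muffin_time friends mooney → Spec_check cookie_time muffin_time friends mooney (check cookie_time muffin_time friends mooney)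

-- ===== LEMMAS AND PROOFS =====
lemma checkBlock_eq_all (c m : Int) (friends : List (Int × Int × Int)) :
    checkBlock c m friends = friends.all (fun f => decide (f.1 * c + f.2.1 * m ≤ f.2.2)) := by
  unfold checkBlock
  rw [show (friends.foldl (fun acc f => acc ++ [decide (f.1 * c + f.2.1 * m ≤ f.2.2)]) [])
        = friends.map (fun f => decide (f.1 * c + f.2.1 * m ≤ f.2.2)) from ?_]
  · simp [List.all_eq]
  · induction friends using List.reverseRecOn with
    | nil => rfl
    | append_singleton xs x ih => simp [List.foldl_append, ih]

-- the pruning loop over a nonempty candidate list decides whether SOME candidate satisfies ALL friends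
lemma pruneLoop_eq_any (friends : List (Int × Int × Int)) (cands : List (Int × Int))
    (h : cands ≠ []) :
    pruneLoop friends cands
      = cands.any (fun p => friends.all (fun f => decide (f.1 * p.1 + f.2.1 * p.2 ≤ f.2.2))) := by
  induction friends generalizing cands with
  | nil =>
    cases cands with
    | nil => exact absurd rfl h
    | cons a t => simp [pruneLoop]
  | cons f rest ih =>
    show (if (cands.filter _).isEmpty then false else pruneLoop rest _) = _
    rw [show (cands.any (fun p => (f :: rest).all (fun g => decide (g.1 * p.1 + g.2.1 * p.2 ≤ g.2.2))))
          = ((cands.filter (fun p => decide (f.1 * p.1 + f.2.1 * p.2 ≤ f.2.2))).any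
              (fun p => rest.all (fun g => decide (g.1 * p.1 + g.2.1 * p.2 ≤ g.2.2)))) from ?_]
    · by_cases he : (cands.filter (fun p => decide (f.1 * p.1 + f.2.1 * p.2 ≤ f.2.2))).isEmpty
      · rw [if_pos he]
        rw [List.isEmpty_iff] at he
        simp [he]
      · rw [if_neg he, ih]
        intro hnil
        exact he (by simp [hnil])
    · simp [List.any_filter]

-- ===== VERDICT (by name: the statement is the Claim_ definition above) =====
theorem check_spec : Claim_equal_check := by
  intro ct mt friends mo _
  unfold Spec_check check check_alt
  rw [pruneLoop_eq_any _ _ (by by_cases h : (PySem.Int.mod mo 2 == 1) = true <;> simp)]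
  simp only [checkBlock_eq_all, List.any_append, List.any_cons, List.any_nil, Bool.or_false,
    sub_sub]
  by_cases hodd : (PySem.Int.mod mo 2 == 1) = true
  · rw [if_pos hodd, if_pos hodd]
    simp only [List.any_cons, List.any_nil, Bool.or_false]
    cases friends.all (fun f => decide (f.1 * (ct - PySem.Int.floordiv mo 2) + f.2.1 * (mt - PySem.Int.floordiv mo 2) ≤ f.2.2)) <;>
    cases friends.all (fun f => decide (f.1 * (ct - (PySem.Int.floordiv mo 2 + 1)) + f.2.1 * (mt - PySem.Int.floordiv mo 2) ≤ f.2.2)) <;>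
    cases friends.all (fun f => decide (f.1 * (ct - PySem.Int.floordiv mo 2) + f.2.1 * (mt - (PySem.Int.floordiv mo 2 + 1)) ≤ f.2.2)) <;>
    cases friends.all (fun f => decide (f.1 * (ct - mo) + f.2.1 * mt ≤ f.2.2)) <;>
    cases friends.all (fun f => decide (f.1 * ct + f.2.1 * (mt - mo) ≤ f.2.2)) <;> rfl
  · rw [if_neg hodd, if_neg hodd]
    simp only [List.any_nil, Bool.or_false]
    cases friends.all (fun f => decide (f.1 * (ct - PySem.Int.floordiv mo 2) + f.2.1 * (mt - PySem.Int.floordiv mo 2) ≤ f.2.2)) <;>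
    cases friends.all (fun f => decide (f.1 * (ct - mo) + f.2.1 * mt ≤ f.2.2)) <;>
    cases friends.all (fun f => decide (f.1 * ct + f.2.1 * (mt - mo) ≤ f.2.2)) <;> rfl
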